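-- pv_equiv track=rewrite | github.com/mnjkhtri/small-LLMs-pytorch | utils/stream.py | _summarize_layer_keys
-- ===== SOURCE A (Python) =====
-- def _summarize_layer_keys(keys):
--     groups, other = {}, []
--     for k in sorted(keys):
--         parts = k.split(".")
--         if len(parts) >= 3 and parts[0] == "h" and parts[1].isdigit():
--             idx = int(parts[1]); rest = ".".join(parts[2:])
--             groups.setdefault(rest, []).append(idx)
--         else:
--             other.append(k)
--
--     def fmt_ranges(nums):
--         nums = sorted(set(nums))
--         if not nums: return ""
--         out=[]; s=e=nums[0]
--         for x in nums[1:]: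
--             if x == e + 1: e = x
--             else: out.append(f"{s}" if s==e else f"{s}..{e}"); s=e=x
--         out.append(f"{s}" if s==e else f"{s}..{e}")
--         return ",".join(out)
--
--     summarized=[]
--     for rest, idxs in sorted(groups.items()):
--         summarized.append(f"h.{{{fmt_ranges(idxs)}}}.{rest}")
--     summarized.extend(other)
--     return summarized
-- ===== SOURCE B (Python) =====
-- def _summarize_layer_keys(keys):
--     pairs, other = [], []
--     for k in keys:
--         parts = k.split(".")
--         if len(parts) >= 3 and parts[0] == "h" and parts[1].isdigit():
--             pairs.append((".".join(parts[2:]), int(parts[1])))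
--         else:
--             other.append(k)
--
--     def fmt_ranges(nums):
--         nums = sorted(set(nums))
--         if not nums:
--             return ""
--         breaks = [(a, b) for a, b in zip(nums, nums[1:]) if b != a + 1]
--         starts = [nums[0]] + [b for _, b in breaks]
--         ends = [a for a, _ in breaks] + [nums[-1]]
--         return ",".join(str(s) if s == e else f"{s}..{e}" for s, e in zip(starts, ends))
--
--     summarized = [
--         f"h.{{{fmt_ranges([i for r, i in pairs if r == rest])}}}.{rest}"
--         for rest in sorted({r for r, _ in pairs})
--     ]
--     summarized.extend(sorted(other))
--     return summarized
-- ===== Notes on version B (the rewrite author's own statement) =====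
-- stated objective: idiomatic
-- what changed: B classifies the unsorted keys into a flat (rest, idx) pair list (no dict, no pre-sort), groups by sorting the distinct rests, sorts 'other' once at the end, and replaces the running s/e pointer scan in fmt_ranges by a zip-adjacent-pairs break-point decomposition (starts/ends comprehensions zipped).
import Mathlib
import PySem

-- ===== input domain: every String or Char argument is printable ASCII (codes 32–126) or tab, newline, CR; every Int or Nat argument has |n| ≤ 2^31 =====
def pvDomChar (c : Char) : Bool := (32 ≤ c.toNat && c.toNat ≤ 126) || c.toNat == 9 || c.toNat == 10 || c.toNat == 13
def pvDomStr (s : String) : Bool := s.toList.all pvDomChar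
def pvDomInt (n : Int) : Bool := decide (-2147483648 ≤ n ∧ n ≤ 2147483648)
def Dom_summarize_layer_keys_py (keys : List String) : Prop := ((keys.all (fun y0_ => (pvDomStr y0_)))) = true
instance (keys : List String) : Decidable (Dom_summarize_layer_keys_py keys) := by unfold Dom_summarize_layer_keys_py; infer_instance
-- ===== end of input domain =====

-- B re-implements _summarize_layer_keys without the dict/pre-sort: a flat pair list grouped
-- by sorted distinct rests, and fmt_ranges via adjacent-pair break points (idiomatic, not faster).


-- ===== PORT A =====
-- literal port of _summarize_layer_keys: sorted keys → dict via setdefault/append + other,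
-- fmt_ranges as the running (out, s, e) scan, then sorted(groups.items()).
-- k.split(".") never raises (sep ≠ ""), so the .getD [] branch is unreachable;
-- int(parts[1]) succeeds under the isdigit guard, so the .getD 0 branch is unreachable.
def summarize_layer_keys_py (keys : List String) : List String :=
  let st := (PySem.List.sorted keys (fun k => k) false).foldl
    (fun (st : PySem.Dict String (List Int) × List String) k =>
      let parts := (PySem.Str.split? k ".").getD []
      if 3 ≤ parts.length ∧ PySem.List.pyGetD parts 0 "" = "h"
          ∧ PySem.Str.strIsdigit (PySem.List.pyGetD parts 1 "") then
        let idx := (PySem.Int.ofStr? (PySem.List.pyGetD parts 1 "")).getD 0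
        let rest := PySem.Str.join "." (PySem.List.slice parts (some 2) none)
        (st.1.modify rest [] (fun v => v ++ [idx]), st.2)
      else (st.1, st.2 ++ [k]))
    (PySem.Dict.empty, [])
  let fmt := fun (nums0 : List Int) =>
    let nums := PySem.List.sorted (PySem.Set.ofList nums0) (fun x => x) false
    match nums with
    | [] => ""
    | n0 :: tl =>
      let fin := tl.foldl
        (fun (acc : List String × Int × Int) x =>
          if x = acc.2.2 + 1 then (acc.1, acc.2.1, x)
          else (acc.1 ++ [if acc.2.1 = acc.2.2 then PySem.Int.toStr acc.2.1
                          else PySem.Str.join "" [PySem.Int.toStr acc.2.1, "..", PySem.Int.toStr acc.2.2]],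
                x, x))
        ([], n0, n0)
      PySem.Str.join "," (fin.1 ++ [if fin.2.1 = fin.2.2 then PySem.Int.toStr fin.2.1
                                    else PySem.Str.join "" [PySem.Int.toStr fin.2.1, "..", PySem.Int.toStr fin.2.2]])
  let items := PySem.List.sorted2 st.1.items (fun p => p.1) (fun p => p.2) false
  (items.map (fun p => PySem.Str.join "" ["h.{", fmt p.2, "}.", p.1])) ++ st.2

-- ===== PORT B =====
-- literal port of Source B: one pass over the unsorted keys into (pairs, other), fmt_ranges via
-- zip-adjacent break points, groups read off sorted({rest}), other sorted at the end.
def summarize_layer_keys_py_alt (keys : List String) : List String :=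
  let st := keys.foldl
    (fun (st : List (String × Int) × List String) k =>
      let parts := (PySem.Str.split? k ".").getD []
      if 3 ≤ parts.length ∧ PySem.List.pyGetD parts 0 "" = "h"
          ∧ PySem.Str.strIsdigit (PySem.List.pyGetD parts 1 "") then
        (st.1 ++ [(PySem.Str.join "." (PySem.List.slice parts (some 2) none),
                   (PySem.Int.ofStr? (PySem.List.pyGetD parts 1 "")).getD 0)], st.2)
      else (st.1, st.2 ++ [k]))
    ([], [])
  let fmt := fun (nums0 : List Int) =>
    let nums := PySem.List.sorted (PySem.Set.ofList nums0) (fun x => x) false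
    match nums with
    | [] => ""
    | n0 :: tl =>
      let breaks := (nums.zip tl).filter (fun p => ¬ p.2 = p.1 + 1)
      let starts := n0 :: breaks.map (fun p => p.2)
      let ends := breaks.map (fun p => p.1) ++ [PySem.List.pyGetD nums (-1) 0]
      PySem.Str.join "," ((starts.zip ends).map (fun p =>
        if p.1 = p.2 then PySem.Int.toStr p.1
        else PySem.Str.join "" [PySem.Int.toStr p.1, "..", PySem.Int.toStr p.2]))
  let rests := PySem.List.sorted (PySem.Set.ofList (st.1.map (fun p => p.1))) (fun r => r) false
  (rests.map (fun rest =>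
    PySem.Str.join "" ["h.{", fmt ((st.1.filter (fun p => p.1 == rest)).map (fun p => p.2)), "}.", rest]))
    ++ PySem.List.sorted st.2 (fun k => k) false

-- ===== PRECONDITION & SPEC =====
def Spec_summarize_layer_keys_py (keys : List String) (out : List String) : Prop := out = summarize_layer_keys_py_alt keys
instance (keys : List String) (out : List String) : Decidable (Spec_summarize_layer_keys_py keys out) := by unfold Spec_summarize_layer_keys_py; infer_instance

-- ===== CLAIM (what is proved, stated in full; the proofs are below) =====
def Claim_equal_summarize_layer_keys_py : Prop := ∀ (keys : List String), Dom_summarize_layer_keys_py keys → Spec_summarize_layer_keys_py keys (summarize_layer_keys_py keys)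

-- ===== LEMMAS AND PROOFS =====

-- proof-side helpers: the shared classification, canonical run decomposition and canonical form

def pvParts (k : String) : List String := (PySem.Str.split? k ".").getD []

def pvCondB (k : String) : Bool :=
  decide (3 ≤ (pvParts k).length ∧ PySem.List.pyGetD (pvParts k) 0 "" = "h"
    ∧ PySem.Str.strIsdigit (PySem.List.pyGetD (pvParts k) 1 ""))

def pvPair (k : String) : String × Int :=
  (PySem.Str.join "." (PySem.List.slice (pvParts k) (some 2) none),
   (PySem.Int.ofStr? (PySem.List.pyGetD (pvParts k) 1 "")).getD 0)

def pvPairsOf (L : List String) : List (String × Int) := (L.filter pvCondB).map pvPair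

def pvOther (L : List String) : List String := L.filter (fun k => !pvCondB k)

def pvTok (p : Int × Int) : String :=
  if p.1 = p.2 then PySem.Int.toStr p.1
  else PySem.Str.join "" [PySem.Int.toStr p.1, "..", PySem.Int.toStr p.2]

def pvRuns (s e : Int) : List Int → List (Int × Int)
  | [] => [(s, e)]
  | y :: ys => if y = e + 1 then pvRuns s y ys else (s, e) :: pvRuns y y ys

def pvFmt (nums0 : List Int) : String :=
  match PySem.List.sorted (PySem.Set.ofList nums0) (fun x => x) false with
  | [] => ""
  | n0 :: tl => PySem.Str.join "," ((pvRuns n0 n0 tl).map pvTok)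

def pvCanon (keys : List String) : List String :=
  ((PySem.List.sorted (PySem.Set.ofList ((pvPairsOf keys).map (fun p => p.1))) (fun r => r) false).map
    (fun rest => PySem.Str.join "" ["h.{",
      pvFmt (((pvPairsOf keys).filter (fun p => p.1 == rest)).map (fun p => p.2)), "}.", rest]))
  ++ PySem.List.sorted (pvOther keys) (fun k => k) false

-- sorted(set(xs)) only depends on xs up to permutation
lemma pv_sortedSet_eq_of_perm {α : Type} [LinearOrder α] [BEq α] [LawfulBEq α]
    (xs ys : List α) (h : xs.Perm ys) :
    PySem.List.sorted (PySem.Set.ofList xs) (fun x => x) false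
      = PySem.List.sorted (PySem.Set.ofList ys) (fun x => x) false := by
  apply PySem.List.sorted_eq_of_perm_of_pairwise_lt
  · exact (PySem.List.sorted_perm _ _ _).trans
      ((List.perm_ext_iff_of_nodup (PySem.Set.nodup_ofList ys) (PySem.Set.nodup_ofList xs)).2
        (fun a => by simp [PySem.Set.mem_ofList, h.mem_iff]))
  · exact PySem.List.sorted_ofList_pairwise_lt ys

lemma pvFmt_perm (xs ys : List Int) (h : xs.Perm ys) : pvFmt xs = pvFmt ys := by
  unfold pvFmt
  rw [pv_sortedSet_eq_of_perm xs ys h]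

-- A's running (out, s, e) scan produces the run tokens
lemma pvA_fmt_loop (xs : List Int) : ∀ (out : List String) (s e : Int),
    (let fin := xs.foldl
        (fun (acc : List String × Int × Int) x =>
          if x = acc.2.2 + 1 then (acc.1, acc.2.1, x)
          else (acc.1 ++ [if acc.2.1 = acc.2.2 then PySem.Int.toStr acc.2.1
                          else PySem.Str.join "" [PySem.Int.toStr acc.2.1, "..", PySem.Int.toStr acc.2.2]],
                x, x))
        (out, s, e)
     fin.1 ++ [if fin.2.1 = fin.2.2 then PySem.Int.toStr fin.2.1
               else PySem.Str.join "" [PySem.Int.toStr fin.2.1, "..", PySem.Int.toStr fin.2.2]])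
      = out ++ (pvRuns s e xs).map pvTok := by
  induction xs with
  | nil => intro out s e; simp [pvRuns, pvTok]
  | cons y ys ih =>
    intro out s e
    by_cases hy : y = e + 1
    · simpa [pvRuns, hy] using ih out s y
    · simp only [List.foldl_cons]
      simp only [pvRuns, hy]
      simpa [pvTok, List.append_assoc] using ih
        (out ++ [if s = e then PySem.Int.toStr s
                 else PySem.Str.join "" [PySem.Int.toStr s, "..", PySem.Int.toStr e]]) y y

-- B's break-point comprehensions produce the run starts/ends
lemma pvB_starts (xs : List Int) : ∀ (s e : Int),
    s :: (((e :: xs).zip xs).filter (fun p => ¬ p.2 = p.1 + 1)).map (fun p => p.2)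
      = (pvRuns s e xs).map (fun p => p.1) := by
  induction xs with
  | nil => intro s e; simp [pvRuns]
  | cons y ys ih =>
    intro s e
    by_cases hy : y = e + 1
    · simpa [pvRuns, hy] using ih s y
    · simp only [pvRuns, hy]
      simpa [hy] using ih y y

lemma pvB_ends (xs : List Int) : ∀ (s e : Int),
    (((e :: xs).zip xs).filter (fun p => ¬ p.2 = p.1 + 1)).map (fun p => p.1)
        ++ [(e :: xs).getLast (List.cons_ne_nil e xs)]
      = (pvRuns s e xs).map (fun p => p.2) := by
  induction xs with
  | nil => intro s e; simp [pvRuns]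
  | cons y ys ih =>
    intro s e
    by_cases hy : y = e + 1
    · simpa [pvRuns, hy, List.getLast_cons_cons] using ih s y
    · simp only [pvRuns, hy]
      simpa [hy, List.getLast_cons_cons] using ih y y

-- B's classification step and loop: flat pair list + other, in input order
def pvStepB (st : List (String × Int) × List String) (k : String) : List (String × Int) × List String :=
  let parts := (PySem.Str.split? k ".").getD []
  if 3 ≤ parts.length ∧ PySem.List.pyGetD parts 0 "" = "h"
      ∧ PySem.Str.strIsdigit (PySem.List.pyGetD parts 1 "") then
    (st.1 ++ [(PySem.Str.join "." (PySem.List.slice parts (some 2) none),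
               (PySem.Int.ofStr? (PySem.List.pyGetD parts 1 "")).getD 0)], st.2)
  else (st.1, st.2 ++ [k])

lemma pvStepB_pos (st : List (String × Int) × List String) (k : String) (h : pvCondB k = true) :
    pvStepB st k = (st.1 ++ [pvPair k], st.2) := by
  have h' : (3 ≤ (pvParts k).length ∧ PySem.List.pyGetD (pvParts k) 0 "" = "h"
      ∧ PySem.Str.strIsdigit (PySem.List.pyGetD (pvParts k) 1 "")) := by
    simpa [pvCondB, decide_eq_true_eq] using h
  simp only [pvStepB]
  split_ifs with hc
  · rfl
  · exact absurd h' hc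

lemma pvStepB_neg (st : List (String × Int) × List String) (k : String) (h : pvCondB k = false) :
    pvStepB st k = (st.1, st.2 ++ [k]) := by
  have h' : ¬ (3 ≤ (pvParts k).length ∧ PySem.List.pyGetD (pvParts k) 0 "" = "h"
      ∧ PySem.Str.strIsdigit (PySem.List.pyGetD (pvParts k) 1 "")) := by
    simpa [pvCondB, decide_eq_true_eq] using h
  simp only [pvStepB]
  split_ifs with hc
  · exact absurd hc h'
  · rfl

lemma pvB_loop (L : List String) (p0 : List (String × Int)) (o0 : List String) :
    L.foldl
      (fun (st : List (String × Int) × List String) k =>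
        let parts := (PySem.Str.split? k ".").getD []
        if 3 ≤ parts.length ∧ PySem.List.pyGetD parts 0 "" = "h"
            ∧ PySem.Str.strIsdigit (PySem.List.pyGetD parts 1 "") then
          (st.1 ++ [(PySem.Str.join "." (PySem.List.slice parts (some 2) none),
                     (PySem.Int.ofStr? (PySem.List.pyGetD parts 1 "")).getD 0)], st.2)
        else (st.1, st.2 ++ [k]))
      (p0, o0)
    = (p0 ++ pvPairsOf L, o0 ++ pvOther L) := by
  show List.foldl pvStepB (p0, o0) L = (p0 ++ pvPairsOf L, o0 ++ pvOther L)
  induction L generalizing p0 o0 with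
  | nil => simp [pvPairsOf, pvOther]
  | cons k L ih =>
    rw [List.foldl_cons]
    by_cases h : pvCondB k
    · rw [pvStepB_pos _ _ h, ih]
      simp [pvPairsOf, pvOther, h]
    · rw [pvStepB_neg _ _ (by simpa using h), ih]
      simp [pvPairsOf, pvOther, h]

-- B's fmt_ranges equals the canonical run formatting
lemma pvB_fmt (nums0 : List Int) :
    (match PySem.List.sorted (PySem.Set.ofList nums0) (fun x => x) false with
     | [] => ""
     | n0 :: tl =>
       let breaks := ((PySem.List.sorted (PySem.Set.ofList nums0) (fun x => x) false).zip tl).filter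
         (fun p => ¬ p.2 = p.1 + 1)
       let starts := n0 :: breaks.map (fun p => p.2)
       let ends := breaks.map (fun p => p.1)
         ++ [PySem.List.pyGetD (PySem.List.sorted (PySem.Set.ofList nums0) (fun x => x) false) (-1) 0]
       PySem.Str.join "," ((starts.zip ends).map (fun p =>
         if p.1 = p.2 then PySem.Int.toStr p.1
         else PySem.Str.join "" [PySem.Int.toStr p.1, "..", PySem.Int.toStr p.2])))
    = pvFmt nums0 := by
  unfold pvFmt
  cases hS : PySem.List.sorted (PySem.Set.ofList nums0) (fun x => x) false with
  | nil => rfl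
  | cons n0 tl =>
    show (PySem.Str.join "," (((n0 :: (((n0 :: tl).zip tl).filter (fun p => ¬ p.2 = p.1 + 1)).map (fun p => p.2)).zip
        ((((n0 :: tl).zip tl).filter (fun p => ¬ p.2 = p.1 + 1)).map (fun p => p.1)
          ++ [PySem.List.pyGetD (n0 :: tl) (-1) 0])).map (fun p =>
        if p.1 = p.2 then PySem.Int.toStr p.1
        else PySem.Str.join "" [PySem.Int.toStr p.1, "..", PySem.Int.toStr p.2])))
      = PySem.Str.join "," ((pvRuns n0 n0 tl).map pvTok)
    rw [PySem.List.pyGetD_neg_one (n0 :: tl) 0 (List.cons_ne_nil n0 tl)]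
    rw [pvB_starts tl n0 n0, pvB_ends tl n0 n0, List.zip_map']
    simp only [List.map_map]
    rfl

-- the B port equals the canonical form
lemma pvB_canon (keys : List String) : summarize_layer_keys_py_alt keys = pvCanon keys := by
  simp only [summarize_layer_keys_py_alt]
  rw [pvB_loop keys [] []]
  simp only [List.nil_append, pvCanon]
  refine congrArg (· ++ PySem.List.sorted (pvOther keys) (fun k => k) false) ?_
  apply List.map_congr_left
  intro r _
  rw [pvB_fmt]

-- A's classification step and loop: dict of index lists + other, over the pre-sorted keys
def pvStepA (st : PySem.Dict String (List Int) × List String) (k : String) :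
    PySem.Dict String (List Int) × List String :=
  let parts := (PySem.Str.split? k ".").getD []
  if 3 ≤ parts.length ∧ PySem.List.pyGetD parts 0 "" = "h"
      ∧ PySem.Str.strIsdigit (PySem.List.pyGetD parts 1 "") then
    let idx := (PySem.Int.ofStr? (PySem.List.pyGetD parts 1 "")).getD 0
    let rest := PySem.Str.join "." (PySem.List.slice parts (some 2) none)
    (st.1.modify rest [] (fun v => v ++ [idx]), st.2)
  else (st.1, st.2 ++ [k])

lemma pvStepA_pos (st : PySem.Dict String (List Int) × List String) (k : String)
    (h : pvCondB k = true) :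
    pvStepA st k
      = (st.1.modify (PySem.Str.join "." (PySem.List.slice ((PySem.Str.split? k ".").getD []) (some 2) none)) []
           (fun v => v ++ [(PySem.Int.ofStr? (PySem.List.pyGetD ((PySem.Str.split? k ".").getD []) 1 "")).getD 0]),
         st.2) := by
  have h' : (3 ≤ (pvParts k).length ∧ PySem.List.pyGetD (pvParts k) 0 "" = "h"
      ∧ PySem.Str.strIsdigit (PySem.List.pyGetD (pvParts k) 1 "")) := by
    simpa [pvCondB, decide_eq_true_eq] using h
  simp only [pvStepA]
  rw [if_pos (show (3 ≤ ((PySem.Str.split? k ".").getD []).length ∧ PySem.List.pyGetD ((PySem.Str.split? k ".").getD []) 0 "" = "h"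
      ∧ PySem.Str.strIsdigit (PySem.List.pyGetD ((PySem.Str.split? k ".").getD []) 1 "")) from h')]

lemma pvStepA_neg (st : PySem.Dict String (List Int) × List String) (k : String)
    (h : pvCondB k = false) :
    pvStepA st k = (st.1, st.2 ++ [k]) := by
  have h' : ¬ (3 ≤ (pvParts k).length ∧ PySem.List.pyGetD (pvParts k) 0 "" = "h"
      ∧ PySem.Str.strIsdigit (PySem.List.pyGetD (pvParts k) 1 "")) := by
    simpa [pvCondB, decide_eq_true_eq] using h
  simp only [pvStepA]
  rw [if_neg (show ¬ (3 ≤ ((PySem.Str.split? k ".").getD []).length ∧ PySem.List.pyGetD ((PySem.Str.split? k ".").getD []) 0 "" = "h"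
      ∧ PySem.Str.strIsdigit (PySem.List.pyGetD ((PySem.Str.split? k ".").getD []) 1 "")) from h')]

lemma pvA_loop (L : List String) (d0 : PySem.Dict String (List Int)) (o0 : List String) :
    L.foldl
      (fun (st : PySem.Dict String (List Int) × List String) k =>
        let parts := (PySem.Str.split? k ".").getD []
        if 3 ≤ parts.length ∧ PySem.List.pyGetD parts 0 "" = "h"
            ∧ PySem.Str.strIsdigit (PySem.List.pyGetD parts 1 "") then
          let idx := (PySem.Int.ofStr? (PySem.List.pyGetD parts 1 "")).getD 0
          let rest := PySem.Str.join "." (PySem.List.slice parts (some 2) none)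
          (st.1.modify rest [] (fun v => v ++ [idx]), st.2)
        else (st.1, st.2 ++ [k]))
      (d0, o0)
    = ((pvPairsOf L).foldl (fun d p => d.modify p.1 [] (fun v => v ++ [p.2])) d0,
       o0 ++ pvOther L) := by
  show List.foldl pvStepA (d0, o0) L = _
  induction L generalizing d0 o0 with
  | nil => simp [pvPairsOf, pvOther]
  | cons k L ih =>
    rw [List.foldl_cons]
    by_cases h : pvCondB k
    · rw [pvStepA_pos _ _ h, ih]
      simp [pvPairsOf, pvOther, h, pvPair, pvParts]
    · rw [pvStepA_neg _ _ (by simpa using h), ih]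
      simp [pvPairsOf, pvOther, h]

-- the dict built by A's setdefault/append loop, characterized
lemma pvA_keys (P : List (String × Int)) :
    (P.foldl (fun d p => d.modify p.1 [] (fun v => v ++ [p.2]))
        (PySem.Dict.empty : PySem.Dict String (List Int))).keys
      = PySem.Set.ofList (P.map (fun p => p.1)) := by
  have h := PySem.Dict.keys_foldl_modify_key (l := P) (key := fun p => p.1)
    (d0 := ([] : List Int)) (f := fun _ p v => v ++ [p.2]) (d := PySem.Dict.empty)
  simpa [PySem.Dict.keys_empty, PySem.Set.ofList_eq_foldl, PySem.Set.update] using h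

lemma pvA_nodup (P : List (String × Int)) :
    (P.foldl (fun d p => d.modify p.1 [] (fun v => v ++ [p.2]))
        (PySem.Dict.empty : PySem.Dict String (List Int))).keys.Nodup := by
  have h := PySem.Dict.nodup_keys_foldl_modify_key (l := P) (key := fun p => p.1)
    (d0 := ([] : List Int)) (f := fun _ p v => v ++ [p.2]) (d := PySem.Dict.empty)
    (by simp [PySem.Dict.keys_empty])
  simpa using h

lemma pvA_getD (P : List (String × Int)) (r : String) :
    (P.foldl (fun d p => d.modify p.1 [] (fun v => v ++ [p.2]))
        (PySem.Dict.empty : PySem.Dict String (List Int))).getD r []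
      = (P.filter (fun p => p.1 == r)).map (fun p => p.2) := by
  have h := PySem.Dict.getD_foldl_modify_append (l := P) (d := PySem.Dict.empty) (c := r)
  simpa [PySem.Dict.getD_empty] using h

lemma pvA_items (P : List (String × Int)) :
    (P.foldl (fun d p => d.modify p.1 [] (fun v => v ++ [p.2]))
        (PySem.Dict.empty : PySem.Dict String (List Int))).items
      = (PySem.Set.ofList (P.map (fun p => p.1))).map
          (fun r => (r, (P.filter (fun p => p.1 == r)).map (fun p => p.2))) := by
  rw [PySem.Dict.items_eq_map_keys _ (pvA_nodup P) ([] : List Int), pvA_keys P]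
  exact List.map_congr_left (fun r _ => by rw [pvA_getD P r])

-- insertion with pointwise-equal comparison functions
lemma pv_insertBy_congr {α : Type} (b b' : α → α → Bool) (x : α) (ys : List α)
    (h : ∀ y ∈ ys, b x y = b' x y) :
    PySem.List.insertBy b x ys = PySem.List.insertBy b' x ys := by
  induction ys with
  | nil => rfl
  | cons y ys ih =>
    simp only [PySem.List.insertBy]
    rw [h y (List.mem_cons_self)]
    split_ifs
    · rfl
    · rw [ih (fun z hz => h z (List.mem_cons_of_mem _ hz))]

lemma pv_foldl_insertBy_congr {α : Type} (b b' : α → α → Bool) (L : List α) (acc : List α)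
    (hL : ∀ a ∈ L, ∀ c ∈ L, b a c = b' a c) (hacc : ∀ a ∈ L, ∀ c ∈ acc, b a c = b' a c) :
    L.foldl (fun acc x => PySem.List.insertBy b x acc) acc
      = L.foldl (fun acc x => PySem.List.insertBy b' x acc) acc := by
  induction L generalizing acc with
  | nil => rfl
  | cons a L ih =>
    simp only [List.foldl_cons]
    rw [pv_insertBy_congr b b' a acc (hacc a List.mem_cons_self)]
    apply ih
    · exact fun x hx c hc => hL x (List.mem_cons_of_mem _ hx) c (List.mem_cons_of_mem _ hc)
    · intro x hx c hc
      rcases (PySem.List.mem_insertBy b' a c acc).1 hc with hca | hca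
      · subst hca
        exact hL x (List.mem_cons_of_mem _ hx) c List.mem_cons_self
      · exact hacc x (List.mem_cons_of_mem _ hx) c hca

-- Python's sorted(items) on the dict items: unique keys, so it is the strictly
-- key-increasing rearrangement
lemma pv_sorted2_eq (xs ys : List (String × List Int))
    (h1 : ys.Perm xs) (h2 : List.Pairwise (fun a b => a.1 < b.1) ys) :
    PySem.List.sorted2 xs (fun p => p.1) (fun p => p.2) false = ys := by
  have hndy : (List.map (fun p => (p : String × List Int).1) ys).Nodup :=
    (List.pairwise_map.2 h2).imp ne_of_lt
  have hnd : (List.map (fun p => (p : String × List Int).1) xs).Nodup :=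
    ((h1.map (fun p => p.1)).nodup_iff).1 hndy
  have hinj := List.inj_on_of_nodup_map hnd
  have key : PySem.List.sorted2 xs (fun p => p.1) (fun p => p.2) false
      = PySem.List.sorted xs (fun p => p.1) false := by
    rw [PySem.List.sorted_eq_foldl_insertBy]
    simp only [PySem.List.sorted2]
    apply pv_foldl_insertBy_congr
    · intro a ha c hc
      by_cases hlt : a.1 < c.1
      · simp [hlt]
      · by_cases hgt : c.1 < a.1
        · simp [hlt, hgt]
        · have heq : a.1 = c.1 := le_antisymm (not_lt.1 hgt) (not_lt.1 hlt)
          have hac : a = c := hinj ha hc heq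
          subst hac
          simp
    · intro a _ c hc
      cases hc
  rw [key]
  exact PySem.List.sorted_eq_of_perm_of_pairwise_lt xs ys _ h1 h2

-- A's fmt_ranges equals the canonical run formatting
lemma pvA_fmt (nums0 : List Int) :
    (match PySem.List.sorted (PySem.Set.ofList nums0) (fun x => x) false with
     | [] => ""
     | n0 :: tl =>
       let fin := tl.foldl
         (fun (acc : List String × Int × Int) x =>
           if x = acc.2.2 + 1 then (acc.1, acc.2.1, x)
           else (acc.1 ++ [if acc.2.1 = acc.2.2 then PySem.Int.toStr acc.2.1
                           else PySem.Str.join "" [PySem.Int.toStr acc.2.1, "..", PySem.Int.toStr acc.2.2]],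
                 x, x))
         ([], n0, n0)
       PySem.Str.join "," (fin.1 ++ [if fin.2.1 = fin.2.2 then PySem.Int.toStr fin.2.1
                                     else PySem.Str.join "" [PySem.Int.toStr fin.2.1, "..", PySem.Int.toStr fin.2.2]]))
    = pvFmt nums0 := by
  unfold pvFmt
  cases hS : PySem.List.sorted (PySem.Set.ofList nums0) (fun x => x) false with
  | nil => rfl
  | cons n0 tl =>
    exact congrArg (PySem.Str.join ",") (by simpa using pvA_fmt_loop tl [] n0 n0)

-- the A port equals the canonical form
lemma pvA_canon (keys : List String) : summarize_layer_keys_py keys = pvCanon keys := by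
  simp only [summarize_layer_keys_py]
  rw [pvA_loop (PySem.List.sorted keys (fun k => k) false) PySem.Dict.empty []]
  simp only [List.nil_append]
  have hPQ : (pvPairsOf (PySem.List.sorted keys (fun k => k) false)).Perm (pvPairsOf keys) :=
    ((PySem.List.sorted_perm keys (fun k => k) false).filter _).map _
  rw [pvA_items]
  rw [pv_sorted2_eq _ _
    ((PySem.List.sorted_perm _ _ _).map _)
    (List.pairwise_map.2 ((PySem.List.sorted_ofList_pairwise_lt _).imp (fun h => h)))]
  rw [List.map_map]
  have hother : pvOther (PySem.List.sorted keys (fun k => k) false)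
      = PySem.List.sorted (pvOther keys) (fun k => k) false := by
    symm
    apply PySem.List.sorted_id_eq_of_perm_of_pairwise
    · exact (PySem.List.sorted_perm keys (fun k => k) false).filter _
    · exact (PySem.List.sorted_pairwise keys (fun k => k)).filter _
  rw [hother]
  unfold pvCanon
  refine congrArg (· ++ PySem.List.sorted (pvOther keys) (fun k => k) false) ?_
  rw [pv_sortedSet_eq_of_perm _ _ (hPQ.map (fun p => p.1))]
  apply List.map_congr_left
  intro r _
  simp only [Function.comp]
  rw [pvA_fmt]
  rw [pvFmt_perm _ _ ((hPQ.filter _).map _)]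


-- ===== VERDICT (by name: the statement is the Claim_ definition above) =====
theorem summarize_layer_keys_py_spec : Claim_equal_summarize_layer_keys_py := by
  intro keys _
  unfold Spec_summarize_layer_keys_py
  rw [pvA_canon, pvB_canon]
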